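-- pv_equiv track=rewrite | github.com/descampsk/advent-of-code | 2022/jeanRobertII/09/mainP2.py | isTouching
-- ===== SOURCE A (Python) =====
-- def isTouching(tPosition, hPosition):
--     adjacentCases = [
--         (hPosition[0]-1, hPosition[1]+1),
--         (hPosition[0]-1, hPosition[1]),
--         (hPosition[0]-1, hPosition[1]-1),
--         (hPosition[0], hPosition[1]+1),
--         (hPosition[0], hPosition[1]),
--         (hPosition[0], hPosition[1]-1),
--         (hPosition[0]+1, hPosition[1]+1),
--         (hPosition[0]+1, hPosition[1]),
--         (hPosition[0]+1, hPosition[1]-1),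
--     ]
--
--     for adjacentCase in adjacentCases:
--         if tPosition == adjacentCase:
--             return True
--
--     return False
-- ===== SOURCE B (Python) =====
-- def isTouching(tPosition, hPosition):
--     return abs(tPosition[0] - hPosition[0]) <= 1 and abs(tPosition[1] - hPosition[1]) <= 1
-- ===== Notes on version B (the rewrite author's own statement) =====
-- stated objective: simpler
-- what changed: Replaces the 9-element neighbour list and its linear scan by a direct Chebyshev-distance test on the coordinate differences; no list is built and there is no loop.
import Mathlib
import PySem

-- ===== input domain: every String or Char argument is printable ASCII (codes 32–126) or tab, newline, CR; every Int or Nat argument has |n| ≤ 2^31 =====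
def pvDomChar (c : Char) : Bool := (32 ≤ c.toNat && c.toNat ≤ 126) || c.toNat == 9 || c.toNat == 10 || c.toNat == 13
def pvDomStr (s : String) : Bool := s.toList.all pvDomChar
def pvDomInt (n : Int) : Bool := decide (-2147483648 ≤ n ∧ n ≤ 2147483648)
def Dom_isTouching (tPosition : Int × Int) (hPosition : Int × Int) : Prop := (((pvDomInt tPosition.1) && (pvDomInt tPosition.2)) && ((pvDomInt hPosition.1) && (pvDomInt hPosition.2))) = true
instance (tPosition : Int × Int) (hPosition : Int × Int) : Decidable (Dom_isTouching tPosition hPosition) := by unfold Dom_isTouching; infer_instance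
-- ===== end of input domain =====

-- B replaces A's 9-cell neighbour table and scan with a direct Chebyshev-distance test (simpler).


-- ===== PORT A =====
-- literal transliteration of A: build the 9 adjacent cells, scan for a match
def isTouching (tPosition : Int × Int) (hPosition : Int × Int) : Bool :=
  let adjacentCases : List (Int × Int) :=
    [ (hPosition.1 - 1, hPosition.2 + 1),
      (hPosition.1 - 1, hPosition.2),
      (hPosition.1 - 1, hPosition.2 - 1),
      (hPosition.1, hPosition.2 + 1),
      (hPosition.1, hPosition.2),
      (hPosition.1, hPosition.2 - 1),
      (hPosition.1 + 1, hPosition.2 + 1),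
      (hPosition.1 + 1, hPosition.2),
      (hPosition.1 + 1, hPosition.2 - 1) ]
  adjacentCases.any (fun adjacentCase => tPosition == adjacentCase)

-- ===== PORT B =====
-- B: Chebyshev-distance predicate, no list, no loop
def isTouching_alt (tPosition : Int × Int) (hPosition : Int × Int) : Bool :=
  (tPosition.1 - hPosition.1).natAbs ≤ 1 && (tPosition.2 - hPosition.2).natAbs ≤ 1

-- ===== PRECONDITION & SPEC =====
def Spec_isTouching (tPosition : Int × Int) (hPosition : Int × Int) (out : Bool) : Prop := out = isTouching_alt tPosition hPosition
instance (tPosition : Int × Int) (hPosition : Int × Int) (out : Bool) : Decidable (Spec_isTouching tPosition hPosition out) := by unfold Spec_isTouching; infer_instance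

-- ===== CLAIM (what is proved, stated in full; the proofs are below) =====
def Claim_equal_isTouching : Prop := ∀ (tPosition : Int × Int) (hPosition : Int × Int), Dom_isTouching tPosition hPosition → Spec_isTouching tPosition hPosition (isTouching tPosition hPosition)

-- ===== LEMMAS AND PROOFS =====

-- ===== VERDICT (by name: the statement is the Claim_ definition above) =====
theorem isTouching_spec : Claim_equal_isTouching := by
  intro t h _
  unfold Spec_isTouching isTouching isTouching_alt
  rcases t with ⟨tx, ty⟩; rcases h with ⟨hx, hy⟩
  rw [Bool.eq_iff_iff]
  simp only [List.any_cons, List.any_nil, Bool.or_eq_true, beq_iff_eq, Prod.mk.injEq,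
    Bool.and_eq_true, decide_eq_true_iff, Bool.false_eq_true, or_false]
  omega
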